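-- pv_equiv track=rewrite | github.com/KimDaeUng/py_algo | 코테/HackerRank_Repeated-String.py | repeatedString
-- ===== SOURCE A (Python) =====
-- def repeatedString(s, n):
--
--     def _gen():
--         i = 0
--         len_s = len(s)
--         while True:
--             yield s[i]
--             i += 1
--             i %= len_s
--     count = 0
--     gen = _gen()
--     for i in range(n):
--         tmp = next(gen)
--         if tmp == 'a':
--             count += 1
--
--     return count
-- ===== SOURCE B (Python) =====
-- def repeatedString(s, n):
--     if n <= 0:
--         return 0
--     q, r = divmod(n, len(s))
--     return q * s.count('a') + s[:r].count('a')
-- ===== Notes on version B (the rewrite author's own statement) =====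
-- stated objective: faster
-- what changed: replaces the per-character generator loop over all n positions with a closed form: full periods times the count of 'a' in s plus the count in the leftover prefix s[:n % len(s)]
import Mathlib
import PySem

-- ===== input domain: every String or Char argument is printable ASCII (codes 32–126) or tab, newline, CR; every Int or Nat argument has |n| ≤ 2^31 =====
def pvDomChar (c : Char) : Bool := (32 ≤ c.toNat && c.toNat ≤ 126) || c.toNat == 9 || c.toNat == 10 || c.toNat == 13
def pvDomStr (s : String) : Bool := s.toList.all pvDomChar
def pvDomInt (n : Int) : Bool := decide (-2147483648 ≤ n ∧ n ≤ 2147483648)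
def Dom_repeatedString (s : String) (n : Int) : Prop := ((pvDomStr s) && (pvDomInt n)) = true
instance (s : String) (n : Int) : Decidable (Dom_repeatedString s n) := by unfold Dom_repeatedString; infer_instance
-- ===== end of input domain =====

-- B replaces A's per-character generator loop over all n positions with a closed form
-- over one period of s (objective: faster, measured as asymptotic).


-- ===== PORT A =====
-- A's generator yields s[i] with i cycling via 'i += 1; i %= len(s)'; the for-loop over
-- range(n) is a fold carrying (count, i).  s[i] is Str.pyGet? (none = IndexError, which
-- only happens for s = "" with n > 0, excluded by Pre_).
def repeatedString (s : String) (n : Int) : Int :=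
  let lenS := PySem.Str.len s
  ((PySem.List.pyRange 0 n).foldl
    (fun (st : Int × Int) _ =>
      let tmp := PySem.Str.pyGet? s st.2
      ((if tmp = some 'a' then st.1 + 1 else st.1), PySem.Int.mod (st.2 + 1) lenS))
    (0, 0)).1

-- ===== PORT B =====
def repeatedString_alt (s : String) (n : Int) : Int :=
  if n ≤ 0 then 0
  else
    let q := PySem.Int.floordiv n (PySem.Str.len s)
    let r := PySem.Int.mod n (PySem.Str.len s)
    q * (PySem.Str.count s "a" : Int) + (PySem.Str.count (PySem.Str.slice s none (some r)) "a" : Int)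

-- ===== PRECONDITION & SPEC =====
-- Pre_ excludes only s = "" with n > 0, where A raises IndexError (and B ZeroDivisionError).
def Pre_repeatedString (s : String) (n : Int) : Prop := 0 < n → s ≠ ""
instance (s : String) (n : Int) : Decidable (Pre_repeatedString s n) := by
  unfold Pre_repeatedString; infer_instance
def pvWitness_repeatedString : String × Int := ("abaca", 12)
def Spec_repeatedString (s : String) (n : Int) (out : Int) : Prop := out = repeatedString_alt s n
instance (s : String) (n : Int) (out : Int) : Decidable (Spec_repeatedString s n out) := by
  unfold Spec_repeatedString; infer_instance

-- ===== CLAIM (what is proved, stated in full; the proofs are below) =====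
def Claim_equal_repeatedString : Prop := ∀ (s : String) (n : Int),
  Dom_repeatedString s n → Pre_repeatedString s n → Spec_repeatedString s n (repeatedString s n)

-- ===== LEMMAS AND PROOFS =====

theorem mod_succ_nat (k m : Nat) : (k % m + 1) % m = (k + 1) % m := by
  conv_rhs => rw [← Nat.mod_add_div k m, Nat.add_right_comm, Nat.add_mul_mod_self_left]

theorem count_take_succ (l : List Char) (r : Nat) (hr : r < l.length) :
    (l.take (r + 1)).count 'a' =
      (l.take r).count 'a' + (if l[r] = 'a' then 1 else 0) := by
  rw [List.take_add_one, List.count_append]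
  simp [List.getElem?_eq_getElem hr, List.count_singleton, beq_iff_eq]

-- invariant of A's loop: after k steps the index is k % m and the count is the closed form
theorem loopA_inv (s : String) (hl : s.toList ≠ []) (k : Nat) :
    (List.range k).foldl
      (fun (st : Int × Int) _ =>
        ((if PySem.Str.pyGet? s st.2 = some 'a' then st.1 + 1 else st.1),
          PySem.Int.mod (st.2 + 1) (PySem.Str.len s)))
      (0, 0)
    = ((↑(k / s.toList.length) * ↑(s.toList.count 'a')
          + ↑((s.toList.take (k % s.toList.length)).count 'a') : Int),
        (↑(k % s.toList.length) : Int)) := by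
  set l := s.toList with hls
  set m := l.length with hm
  have hm0 : 0 < m := hm ▸ List.length_pos_iff.mpr hl
  induction k with
  | zero => simp [Nat.zero_mod, Nat.zero_div]
  | succ k ih =>
    rw [List.range_succ, List.foldl_append, ih]
    have hkm : k % m < m := Nat.mod_lt _ hm0
    have hkm' : k % m < l.length := hm ▸ hkm
    have hget : PySem.Str.pyGet? s ((k % m : Nat) : Int) = some (l[k % m]'hkm') := by
      rw [PySem.Str.pyGet?_natCast, ← hls, List.getElem?_eq_getElem hkm']
    have hlen : PySem.Str.len s = (m : Int) := by rw [PySem.Str.len_eq, ← hls, ← hm]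
    have hmod : PySem.Int.mod (((k % m : Nat) : Int) + 1) (PySem.Str.len s)
        = (((k + 1) % m : Nat) : Int) := by
      rw [hlen]
      have : (((k % m : Nat) : Int) + 1) = ((k % m + 1 : Nat) : Int) := by push_cast; ring
      rw [this, PySem.Int.mod_natCast, mod_succ_nat]
    simp only [List.foldl_cons, List.foldl_nil, hget, hmod]
    refine Prod.ext ?_ rfl
    simp only
    rcases Nat.lt_or_ge (k % m + 1) m with hlt | hge
    · have hdiv : (k + 1) / m = k / m := by
        conv_lhs => rw [← Nat.mod_add_div k m, Nat.add_right_comm,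
          Nat.add_mul_div_left _ _ hm0, Nat.div_eq_of_lt hlt]
        omega
      have hmod2 : (k + 1) % m = k % m + 1 := by rw [← mod_succ_nat, Nat.mod_eq_of_lt hlt]
      rw [hdiv, hmod2, count_take_succ l _ hkm']
      by_cases hc : l[k % m]'hkm' = 'a'
      · rw [if_pos (by rw [hc]), if_pos hc]; push_cast; ring
      · rw [if_neg (by simpa using hc), if_neg hc]; push_cast; ring
    · have heq : k % m + 1 = m := by omega
      have hdiv : (k + 1) / m = k / m + 1 := by
        conv_lhs => rw [← Nat.mod_add_div k m, Nat.add_right_comm,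
          Nat.add_mul_div_left _ _ hm0, heq, Nat.div_self hm0]
        omega
      have hmod2 : (k + 1) % m = 0 := by rw [← mod_succ_nat, heq, Nat.mod_self]
      have htake : ((l.take (k % m)).count 'a' + if l[k % m]'hkm' = 'a' then 1 else 0)
          = l.count 'a' := by
        rw [← count_take_succ l _ hkm', heq, List.take_of_length_le (le_of_eq hm.symm)]
      rw [hdiv, hmod2]
      simp only [List.take_zero, List.count_nil, Nat.cast_zero, add_zero]
      by_cases hc : l[k % m]'hkm' = 'a'
      · have hcnt : l.count 'a' = (l.take (k % m)).count 'a' + 1 := by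
          rw [← htake, if_pos hc]
        rw [if_pos (by rw [hc]), hcnt]; push_cast; ring
      · have hcnt : l.count 'a' = (l.take (k % m)).count 'a' := by
          rw [← htake, if_neg hc]; omega
        rw [if_neg (by simpa using hc), hcnt]; push_cast; ring

-- Python's s.count('a') for the single-character needle is the character count
theorem count_go_singleton (fuel : Nat) (l : List Char) (acc : Nat) (h : l.length ≤ fuel) :
    PySem.Chars.count.go ['a'] fuel l acc = acc + l.count 'a' := by
  induction fuel generalizing l acc with
  | zero =>
    have : l = [] := List.eq_nil_of_length_eq_zero (Nat.le_zero.mp h)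
    subst this; simp [PySem.Chars.count.go]
  | succ f ih =>
    cases l with
    | nil => simp [PySem.Chars.count.go]
    | cons c t =>
      rw [PySem.Chars.count.go]
      by_cases hc : c = 'a'
      · subst hc
        rw [if_pos (by simp [List.isPrefixOf])]
        have hd : List.drop (['a'] : List Char).length ('a' :: t) = t := rfl
        rw [hd, ih t _ (by simpa using h)]
        simp
        omega
      · simp only [List.isPrefixOf]
        rw [if_neg (by simp; exact fun h' => hc h'.symm)]
        rw [ih t _ (by simpa using h)]
        simp [hc]

theorem str_count_singleton (s : String) : PySem.Str.count s "a" = s.toList.count 'a' := by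
  rw [PySem.Str.count_eq]
  have h1 : ("a" : String).toList = ['a'] := rfl
  rw [h1, PySem.Chars.count]
  rw [if_neg (by simp)]
  rw [count_go_singleton _ _ _ le_rfl]; omega

-- ===== VERDICT (by name: the statement is the Claim_ definition above) =====
theorem repeatedString_spec : Claim_equal_repeatedString := by
  intro s n _ hpre
  simp only [Spec_repeatedString, repeatedString, repeatedString_alt]
  rcases le_or_gt n 0 with hn | hn
  · have : PySem.List.pyRange 0 n = [] := by
      apply PySem.List.pyRange_one_eq_nil (by omega)
    simp [this, hn]
  · have hs : s ≠ "" := hpre hn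
    have hl : s.toList ≠ [] := by
      intro h; apply hs; ext1; simpa using h
    have hnk : n = ((n.toNat : Nat) : Int) := by omega
    rw [if_neg (by omega)]
    set l := s.toList with hls
    set m := l.length with hm
    have hlen : PySem.Str.len s = (m : Int) := by rw [PySem.Str.len_eq, ← hls, ← hm]
    rw [hnk, PySem.List.pyRange_zero_natCast, List.foldl_map, loopA_inv s hl]
    rw [hlen, PySem.Int.floordiv_natCast, PySem.Int.mod_natCast]
    have hslice : (PySem.Str.slice s none (some ((n.toNat % m : Nat) : Int))).toList
        = l.take (n.toNat % m) := by
      simp only [PySem.Str.slice, String.toList_ofList, PySem.Chars.slice,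
        PySem.List.slice_to_natCast, hls]
    rw [str_count_singleton, str_count_singleton, hslice]
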